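-- pv_equiv track=rewrite | github.com/LiuJiajun100938083/School-AI-Assistant-Demo | app/domains/exam_creator/service.py | _distribute_marks
-- ===== SOURCE A (Python) =====
-- from typing import Any, Dict, List, Optional
--
-- def _distribute_marks(
--     question_count: int, total_marks: int,
-- ) -> List[int]:
--     """
--     將總分均勻分配到每道題。
--
--     規則：
--     - 基礎分 = total_marks // question_count
--     - 餘數分配給前幾題（每題 +1）
--     """
--     base = total_marks // question_count
--     remainder = total_marks % question_count
--
--     marks = []
--     for i in range(question_count):
--         marks.append(base + (1 if i < remainder else 0))
--     return marks
-- ===== SOURCE B (Python) =====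
-- from typing import List
--
--
-- def _distribute_marks(
--     question_count: int, total_marks: int,
-- ) -> List[int]:
--     # Greedy single pass: each question gets the ceiling of the marks still
--     # to hand out divided by the questions still to fill.
--     marks = []
--     remaining = total_marks
--     left = question_count
--     while left > 0:
--         give = -(-remaining // left)
--         marks.append(give)
--         remaining -= give
--         left -= 1
--     return marks
-- ===== Notes on version B (the rewrite author's own statement) =====
-- stated objective: alternative
-- what changed: Replaces the precomputed base/remainder split with a greedy single pass that maintains (remaining marks, questions left) and gives each question ceil(remaining/left), never computing total_marks % question_count at all.
import Mathlib
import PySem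

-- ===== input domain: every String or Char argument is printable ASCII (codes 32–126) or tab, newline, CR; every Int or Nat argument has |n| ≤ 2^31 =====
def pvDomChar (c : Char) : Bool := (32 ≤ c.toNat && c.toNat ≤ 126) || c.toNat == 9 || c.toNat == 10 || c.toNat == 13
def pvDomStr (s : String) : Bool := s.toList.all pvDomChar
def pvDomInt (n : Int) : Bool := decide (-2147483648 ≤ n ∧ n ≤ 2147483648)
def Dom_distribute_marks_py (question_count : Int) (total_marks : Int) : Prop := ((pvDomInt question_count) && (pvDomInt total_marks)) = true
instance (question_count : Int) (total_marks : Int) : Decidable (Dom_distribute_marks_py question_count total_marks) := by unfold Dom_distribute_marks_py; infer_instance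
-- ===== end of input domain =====

-- B replaces A's precomputed base/remainder split by a greedy single pass handing each
-- question ceil(remaining/left); objective: alternative. Equivalence proved on
-- question_count ≠ 0 (Python A raises ZeroDivisionError at 0).

-- ===== PORT A =====
def distribute_marks_py (question_count : Int) (total_marks : Int) : List Int :=
  let base := PySem.Int.floordiv total_marks question_count
  let remainder := PySem.Int.mod total_marks question_count
  (PySem.List.pyRange 0 question_count 1).foldl
    (fun marks i => marks ++ [base + (if i < remainder then 1 else 0)]) []

-- ===== PORT B =====
-- the 'while left > 0' loop of Source B; terminates since left.toNat decreases
def dmGo (marks : List Int) (remaining : Int) (left : Int) : List Int :=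
  if h : 0 < left then
    let give := -(PySem.Int.floordiv (-remaining) left)
    dmGo (marks ++ [give]) (remaining - give) (left - 1)
  else marks
termination_by left.toNat
decreasing_by omega

def distribute_marks_py_alt (question_count : Int) (total_marks : Int) : List Int :=
  dmGo [] total_marks question_count

-- ===== PRECONDITION & SPEC =====
-- Pre_ excludes exactly question_count = 0, where Python A raises ZeroDivisionError.
def Pre_distribute_marks_py (question_count : Int) (total_marks : Int) : Prop := question_count ≠ 0
instance (question_count : Int) (total_marks : Int) : Decidable (Pre_distribute_marks_py question_count total_marks) := by unfold Pre_distribute_marks_py; infer_instance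
def pvWitness_distribute_marks_py : Int × Int := (4, 10)

def Spec_distribute_marks_py (question_count : Int) (total_marks : Int) (out : List Int) : Prop := out = distribute_marks_py_alt question_count total_marks
instance (question_count : Int) (total_marks : Int) (out : List Int) : Decidable (Spec_distribute_marks_py question_count total_marks out) := by unfold Spec_distribute_marks_py; infer_instance

-- ===== CLAIM (what is proved, stated in full; the proofs are below) =====
def Claim_equal_distribute_marks_py : Prop := ∀ (question_count : Int) (total_marks : Int), Dom_distribute_marks_py question_count total_marks → Pre_distribute_marks_py question_count total_marks → Spec_distribute_marks_py question_count total_marks (distribute_marks_py question_count total_marks)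
-- ===== LEMMAS AND PROOFS =====

-- a non-positive counter ends the loop at once
theorem dmGo_nonpos (marks : List Int) (remaining left : Int) (h : ¬ 0 < left) :
    dmGo marks remaining left = marks := by
  unfold dmGo; simp [h]

-- loop invariant: with n questions left and t marks left, the greedy loop appends exactly
-- the list A's formula describes for (t, n)
theorem dmGo_eq_map (n : Nat) : ∀ (t : Int) (acc : List Int),
    dmGo acc t (n : Int) =
      acc ++ (List.range n).map
        (fun (k : Nat) => PySem.Int.floordiv t n + if (k : Int) < PySem.Int.mod t n then 1 else 0) := by
  induction n with
  | zero => intro t acc; simp [dmGo_nonpos]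
  | succ n ih =>
    intro t acc
    have hcast : ((n+1 : Nat) : Int) = (n : Int) + 1 := by push_cast; ring
    rw [hcast]
    set m : Int := (n : Int) + 1 with hmdef
    have hm : (0:Int) < m := by omega
    set base := PySem.Int.floordiv t m with hb
    set r := PySem.Int.mod t m with hrdef
    have hdm : base * m + r = t := PySem.Int.floordiv_mul_add_mod t m
    have hdm' : base * (n : Int) + base + r = t := by rw [hmdef] at hdm; nlinarith [hdm]
    have hrb : 0 ≤ r ∧ r < m := by
      have he := PySem.Int.mod_eq_emod_of_pos (a := t) hm
      rw [hrdef, he]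
      exact ⟨Int.emod_nonneg t (by omega), Int.emod_lt_of_pos t hm⟩
    -- the greedy step gives base + 1 while remainder is unspent, base afterwards
    have hgive : -(PySem.Int.floordiv (-t) m) = base + (if 0 < r then 1 else 0) := by
      rw [PySem.Int.neg_floordiv_neg_eq_iff_of_pos hm]
      split_ifs with h0 <;> constructor <;> nlinarith [hrb.1, hrb.2]
    have hstep : dmGo acc t m =
        dmGo (acc ++ [base + (if 0 < r then 1 else 0)])
          (t - (base + (if 0 < r then 1 else 0))) (m - 1) := by
      rw [dmGo]
      simp only [hm, dif_pos, hgive]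
    rw [hstep]
    set c : Int := if 0 < r then 1 else 0 with hc
    have hcr : (0 < r ∧ c = 1) ∨ (r = 0 ∧ c = 0) := by
      rw [hc]; split_ifs with h0
      · exact Or.inl ⟨h0, rfl⟩
      · exact Or.inr ⟨by omega, rfl⟩
    have hmn : m - 1 = (n : Int) := by omega
    rw [hmn, ih]
    by_cases hn0 : n = 0
    · -- one question left: it receives the whole remainder
      subst hn0
      rw [hc]
      simp [List.range_succ]
    · -- still n > 0 questions: the new (base, remainder) pair is (base, r - c)
      have hnpos : (0:Int) < (n : Int) := by omega
      have hq : PySem.Int.floordiv (t - (base + c)) (n : Int) = base := by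
        rw [PySem.Int.floordiv_eq_iff_of_pos hnpos]
        rcases hcr with ⟨h1,h2⟩|⟨h1,h2⟩ <;>
          constructor <;> nlinarith [hrb.1, hrb.2, h1, h2, hdm']
      have hr' : PySem.Int.mod (t - (base + c)) (n : Int) = r - c := by
        have h1 := PySem.Int.floordiv_mul_add_mod (t - (base + c)) (n : Int)
        rw [hq] at h1
        omega
      rw [hq, hr']
      -- peel the head off A's (n+1)-question list
      rw [List.range_succ_eq_map, List.map_cons, List.map_map]
      simp only [List.append_assoc, List.singleton_append]
      congr 1
      congr 1
      -- head (question 0 of the (n+1)-block) closes; the shifted tail is left as a ∀-goal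
      all_goals rw [hc]; norm_num
      all_goals intro a _
      all_goals rcases hcr with ⟨h1,h2⟩|⟨h1,h2⟩ <;> split_ifs <;> omega

-- ===== VERDICT (by name: the statement is the Claim_ definition above) =====
theorem distribute_marks_py_spec : Claim_equal_distribute_marks_py := by
  intro qc tm _ hpre
  unfold Spec_distribute_marks_py distribute_marks_py distribute_marks_py_alt
  rw [PySem.List.foldl_append_singleton_eq_map, PySem.List.pyRange_one, List.map_map]
  rcases lt_trichotomy qc 0 with hneg | hz | hpos
  · have h1 : (qc - 0).toNat = 0 := by omega
    rw [h1, dmGo_nonpos _ _ _ (by omega)]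
    simp
  · exact absurd hz hpre
  · have h2 : (qc - 0).toNat = qc.toNat := by omega
    rw [h2]
    have hcast : ((qc.toNat : Int)) = qc := by omega
    rw [← hcast, dmGo_eq_map]
    have h4 : max qc 0 = qc := by omega
    simp only [Int.toNat_natCast]
    simp [Function.comp_def]
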